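-- pv_equiv track=rewrite | github.com/15236702150master/wilber-workflow | src/wilberflow/server.py | _with_batched_request_label_prefix
-- ===== SOURCE A (Python) =====
-- def _toml_unquote(value: str) -> str:
--     text = value.strip()
--     if len(text) >= 2 and text[0] == '"' and text[-1] == '"':
--         inner = text[1:-1]
--         return inner.replace('\\"', '"').replace("\\\\", "\\")
--     return text
--
-- def _toml_quote(value: str) -> str:
--     return '"' + value.replace("\\", "\\\\").replace('"', '\\"') + '"'
--
-- def _with_batched_request_label_prefix(config_toml: str, batch_id: str) -> str:
--     lines = config_toml.splitlines()
--     in_request_section = False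
--     replaced = False
--     for index, line in enumerate(lines):
--         stripped = line.strip()
--         if stripped.startswith("[") and stripped.endswith("]"):
--             if in_request_section and not replaced:
--                 lines.insert(index, f"request_label_prefix = {_toml_quote(f'wilberflow_{batch_id}')}")
--                 replaced = True
--                 break
--             in_request_section = stripped == "[request]"
--             continue
--         if not in_request_section or not stripped.startswith("request_label_prefix"):
--             continue
--         _, _, raw_value = line.partition("=")
--         prefix = _toml_unquote(raw_value).strip() or "wilberflow"
--         if not prefix.endswith(f"_{batch_id}"):
--             prefix = f"{prefix}_{batch_id}"
--         lines[index] = f"request_label_prefix = {_toml_quote(prefix)}"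
--         replaced = True
--         break
--     if in_request_section and not replaced:
--         lines.append(f"request_label_prefix = {_toml_quote(f'wilberflow_{batch_id}')}")
--     return "\n".join(lines) + ("\n" if config_toml.endswith("\n") else "")
-- ===== SOURCE B (Python) =====
-- # B: locate-then-splice decomposition: split the lines at the first [request] header,
-- # split its section off at the next header, then splice in the rewritten/default key line.
--
-- def _toml_unquote(value: str) -> str:
--     text = value.strip()
--     if len(text) >= 2 and text[0] == '"' and text[-1] == '"':
--         inner = text[1:-1]
--         return inner.replace('\\"', '"').replace("\\\\", "\\")
--     return text
--
-- def _toml_quote(value: str) -> str: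
--     return '"' + value.replace("\\", "\\\\").replace('"', '\\"') + '"'
--
-- def _span_to(pred, xs):
--     """(prefix of lines not satisfying pred, suffix from the first line satisfying pred)."""
--     for i, x in enumerate(xs):
--         if pred(x):
--             return list(xs[:i]), list(xs[i:])
--     return list(xs), []
--
-- def _is_header(line):
--     s = line.strip()
--     return s.startswith("[") and s.endswith("]")
--
-- def _is_key(line):
--     return line.strip().startswith("request_label_prefix")
--
-- def _rewrite_key_line(line, batch_id):
--     _, _, raw_value = line.partition("=")
--     prefix = _toml_unquote(raw_value).strip() or "wilberflow"
--     if not prefix.endswith(f"_{batch_id}"):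
--         prefix = f"{prefix}_{batch_id}"
--     return f"request_label_prefix = {_toml_quote(prefix)}"
--
-- def _spliced_tail(after, batch_id, default_line):
--     """Rewrite the [request] section body sitting at the start of `after`."""
--     section, tail = _span_to(_is_header, after)
--     kpre, krest = _span_to(_is_key, section)
--     if krest:
--         return kpre + [_rewrite_key_line(krest[0], batch_id)] + krest[1:] + tail
--     return section + [default_line] + tail
--
-- def _with_batched_request_label_prefix(config_toml: str, batch_id: str) -> str:
--     lines = config_toml.splitlines()
--     default_line = f"request_label_prefix = {_toml_quote(f'wilberflow_{batch_id}')}"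
--     pre, rest = _span_to(lambda l: l.strip() == "[request]", lines)
--     if not rest:
--         body = lines
--     else:
--         body = pre + [rest[0]] + _spliced_tail(rest[1:], batch_id, default_line)
--     return "\n".join(body) + ("\n" if config_toml.endswith("\n") else "")
-- ===== Notes on version B (the rewrite author's own statement) =====
-- stated objective: alternative
-- what changed: A's single stateful scan with in_request/replaced flags, in-place insert/assignment and break is replaced by a locate-and-splice decomposition: span to the first [request] header, span to the section's end header, span to the key line inside it, then splice the rewritten or default key line into the three pieces.
import Mathlib
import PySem

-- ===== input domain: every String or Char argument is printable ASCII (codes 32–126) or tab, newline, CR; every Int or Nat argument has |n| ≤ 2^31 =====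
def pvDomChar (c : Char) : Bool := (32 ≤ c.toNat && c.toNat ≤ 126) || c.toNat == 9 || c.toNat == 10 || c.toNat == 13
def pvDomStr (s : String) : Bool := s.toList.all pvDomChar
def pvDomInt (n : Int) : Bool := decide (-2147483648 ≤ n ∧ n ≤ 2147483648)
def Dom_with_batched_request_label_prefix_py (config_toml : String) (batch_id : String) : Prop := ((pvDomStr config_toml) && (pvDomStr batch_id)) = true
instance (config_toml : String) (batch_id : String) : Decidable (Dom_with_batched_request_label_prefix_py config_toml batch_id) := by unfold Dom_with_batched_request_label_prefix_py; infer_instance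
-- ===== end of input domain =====

-- B replaces A's single stateful scan-with-break by a locate-and-splice decomposition
-- (span to the [request] header, span to the section end, span to the key line, splice);
-- same cost, different structure ("alternative").

-- shared leaf helpers (both Pythons define the identical _toml_unquote/_toml_quote and
-- the same stripped-line predicates; ported once, used by both ports)

-- line.partition("=")'s third component: everything after the first '=', "" if none
-- (hand port of str.partition with a 1-char separator; exact there)
def pvPartAfterEq : List Char → List Char
  | [] => []
  | c :: rest => if c = '=' then rest else pvPartAfterEq rest

def pvTomlUnquote (value : String) : String :=
  let text := PySem.Str.strip value
  if PySem.Str.len text ≥ 2 ∧ PySem.Str.pyGet? text 0 = some '"' ∧ PySem.Str.pyGet? text (-1) = some '"' then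
    let inner := String.ofList (PySem.List.slice text.toList (some 1) (some (-1)))
    PySem.Str.replace (PySem.Str.replace inner "\\\"" "\"") "\\\\" "\\"
  else text

def pvTomlQuote (value : String) : String :=
  "\"" ++ PySem.Str.replace (PySem.Str.replace value "\\" "\\\\") "\"" "\\\"" ++ "\""

def pvIsHeader (line : String) : Bool :=
  let s := PySem.Str.strip line
  PySem.Str.startswith s "[" && PySem.Str.endswith s "]"

def pvIsKey (line : String) : Bool :=
  PySem.Str.startswith (PySem.Str.strip line) "request_label_prefix"

def pvIsReq (line : String) : Bool :=
  PySem.Str.strip line == "[request]"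

def pvDefaultLine (batch_id : String) : String :=
  "request_label_prefix = " ++ pvTomlQuote ("wilberflow_" ++ batch_id)

def pvRewriteLine (batch_id : String) (line : String) : String :=
  let raw_value := String.ofList (pvPartAfterEq line.toList)
  let p0 := PySem.Str.strip (pvTomlUnquote raw_value)
  let prefix0 := if p0 == "" then "wilberflow" else p0       -- Python's `or "wilberflow"`
  let prefix1 := if PySem.Str.endswith prefix0 ("_" ++ batch_id) then prefix0
                 else prefix0 ++ "_" ++ batch_id
  "request_label_prefix = " ++ pvTomlQuote prefix1

-- ===== PORT A =====
-- A's for-loop with enumerate/insert/break, as structural recursion over the remaining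
-- lines with the already-passed lines accumulated in reverse; the post-loop
-- `if in_request_section and not replaced: append` is the [] case with inReq = true
-- (replaced = true always ends the loop at once, so it needs no state).
def pvLoopA (d : String) (rw : String → String) :
    List String → List String → Bool → List String
  | acc, [], inReq => if inReq then acc.reverse ++ [d] else acc.reverse
  | acc, l :: rest, inReq =>
    let s := PySem.Str.strip l
    if PySem.Str.startswith s "[" && PySem.Str.endswith s "]" then
      if inReq then acc.reverse ++ d :: l :: rest            -- insert before this header, break
      else pvLoopA d rw (l :: acc) rest (s == "[request]")
    else if inReq && PySem.Str.startswith s "request_label_prefix" then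
      acc.reverse ++ rw l :: rest                            -- lines[index] = …, break
    else pvLoopA d rw (l :: acc) rest inReq

def with_batched_request_label_prefix_py (config_toml : String) (batch_id : String) : String :=
  let lines := PySem.Str.splitlines config_toml
  let result := pvLoopA (pvDefaultLine batch_id) (pvRewriteLine batch_id) [] lines false
  PySem.Str.join "\n" result ++ (if PySem.Str.endswith config_toml "\n" then "\n" else "")

-- ===== PORT B =====
-- _span_to(pred, xs) = (xs[:i], xs[i:]) at the first i with pred(xs[i]) (all of xs, [] if none)
def pvSpanTo (p : String → Bool) : List String → List String × List String
  | [] => ([], [])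
  | l :: rest =>
    if p l then ([], l :: rest)
    else
      let (a, b) := pvSpanTo p rest
      (l :: a, b)

-- _spliced_tail(after, batch_id, default_line)
def pvSplicedTail (d : String) (rw : String → String) (after : List String) : List String :=
  match pvSpanTo pvIsHeader after with
  | (sec, tail) =>
    match pvSpanTo pvIsKey sec with
    | (kpre, krest) =>
      match krest with
      | k :: ks => kpre ++ rw k :: ks ++ tail
      | [] => sec ++ [d] ++ tail

def with_batched_request_label_prefix_py_alt (config_toml : String) (batch_id : String) : String :=
  let lines := PySem.Str.splitlines config_toml
  let body :=
    match pvSpanTo pvIsReq lines with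
    | (_, []) => lines
    | (pre, h :: after) =>
      pre ++ h :: pvSplicedTail (pvDefaultLine batch_id) (pvRewriteLine batch_id) after
  PySem.Str.join "\n" body ++ (if PySem.Str.endswith config_toml "\n" then "\n" else "")

-- ===== PRECONDITION & SPEC =====
def Spec_with_batched_request_label_prefix_py (config_toml : String) (batch_id : String) (out : String) : Prop := out = with_batched_request_label_prefix_py_alt config_toml batch_id
instance (config_toml : String) (batch_id : String) (out : String) : Decidable (Spec_with_batched_request_label_prefix_py config_toml batch_id out) := by unfold Spec_with_batched_request_label_prefix_py; infer_instance

-- ===== CLAIM (what is proved, stated in full; the proofs are below) =====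
def Claim_equal_with_batched_request_label_prefix_py : Prop := ∀ (config_toml : String) (batch_id : String), Dom_with_batched_request_label_prefix_py config_toml batch_id → Spec_with_batched_request_label_prefix_py config_toml batch_id (with_batched_request_label_prefix_py config_toml batch_id)

-- ===== LEMMAS AND PROOFS =====

theorem pvSpanTo_append (p : String → Bool) (xs : List String) :
    (pvSpanTo p xs).1 ++ (pvSpanTo p xs).2 = xs := by
  induction xs with
  | nil => simp [pvSpanTo]
  | cons l rest ih =>
    by_cases h : p l = true
    · simp [pvSpanTo, h]
    · simp only [Bool.not_eq_true] at h
      simp [pvSpanTo, h] at ih ⊢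
      exact ih

theorem pvSplicedTail_nil (d : String) (rw : String → String) :
    pvSplicedTail d rw [] = [d] := by
  simp [pvSplicedTail, pvSpanTo]

theorem pvSplicedTail_header (d : String) (rw : String → String) (l : String) (ls : List String)
    (h : pvIsHeader l = true) :
    pvSplicedTail d rw (l :: ls) = d :: l :: ls := by
  simp [pvSplicedTail, pvSpanTo, h]

theorem pvSplicedTail_key (d : String) (rw : String → String) (l : String) (ls : List String)
    (h1 : pvIsHeader l = false) (h2 : pvIsKey l = true) :
    pvSplicedTail d rw (l :: ls) = rw l :: ls := by
  have hap := pvSpanTo_append pvIsHeader ls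
  simp [pvSplicedTail, pvSpanTo, h1, h2, hap]

theorem pvSplicedTail_skip (d : String) (rw : String → String) (l : String) (ls : List String)
    (h1 : pvIsHeader l = false) (h2 : pvIsKey l = false) :
    pvSplicedTail d rw (l :: ls) = l :: pvSplicedTail d rw ls := by
  simp only [pvSplicedTail, pvSpanTo, h1, h2, if_false, Bool.false_eq_true]
  rcases hh : pvSpanTo pvIsHeader ls with ⟨sec, tail⟩
  rcases hk : pvSpanTo pvIsKey sec with ⟨kpre, krest⟩
  cases krest <;> simp

-- B's body as a function, to state the loop invariant against
def pvBodyOf (d : String) (rw : String → String) (lines : List String) : List String :=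
  match pvSpanTo pvIsReq lines with
  | (_, []) => lines
  | (pre, h :: after) => pre ++ h :: pvSplicedTail d rw after

theorem pvBodyOf_req (d : String) (rw : String → String) (l : String) (ls : List String)
    (h : pvIsReq l = true) :
    pvBodyOf d rw (l :: ls) = l :: pvSplicedTail d rw ls := by
  simp [pvBodyOf, pvSpanTo, h]

theorem pvBodyOf_skip (d : String) (rw : String → String) (l : String) (ls : List String)
    (h : pvIsReq l = false) :
    pvBodyOf d rw (l :: ls) = l :: pvBodyOf d rw ls := by
  simp only [pvBodyOf, pvSpanTo, h, if_false, Bool.false_eq_true]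
  rcases hh : pvSpanTo pvIsReq ls with ⟨pre, rest⟩
  cases rest <;> simp

theorem pvIsReq_isHeader (l : String) (h : pvIsReq l = true) : pvIsHeader l = true := by
  unfold pvIsReq at h
  have : PySem.Str.strip l = "[request]" := by
    exact eq_of_beq h
  unfold pvIsHeader
  rw [this]
  decide

theorem pvLoopA_true (d : String) (rw : String → String) (after : List String) :
    ∀ acc, pvLoopA d rw acc after true = acc.reverse ++ pvSplicedTail d rw after := by
  induction after with
  | nil => intro acc; simp [pvLoopA, pvSplicedTail_nil]
  | cons l ls ih =>
    intro acc
    by_cases hh : pvIsHeader l = true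
    · unfold pvIsHeader at hh
      simp only [pvLoopA, hh, if_true, pvSplicedTail_header d rw l ls (by unfold pvIsHeader; exact hh)]
    · have hh' : (PySem.Str.startswith (PySem.Str.strip l) "[" && PySem.Str.endswith (PySem.Str.strip l) "]") = false := by
        simpa [pvIsHeader] using hh
      simp only [Bool.not_eq_true] at hh
      by_cases hk : pvIsKey l = true
      · have hk' : PySem.Str.startswith (PySem.Str.strip l) "request_label_prefix" = true := by
          simpa [pvIsKey] using hk
        simp only [pvLoopA, hh', hk', Bool.true_and, if_true, Bool.false_eq_true, if_false,
          pvSplicedTail_key d rw l ls hh hk]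
      · simp only [Bool.not_eq_true] at hk
        have hk' : PySem.Str.startswith (PySem.Str.strip l) "request_label_prefix" = false := by
          simpa [pvIsKey] using hk
        simp only [pvLoopA, hh', hk', Bool.true_and, Bool.false_eq_true, if_false,
          pvSplicedTail_skip d rw l ls hh hk]
        rw [ih (l :: acc)]
        simp

theorem pvLoopA_false (d : String) (rw : String → String) (lines : List String) :
    ∀ acc, pvLoopA d rw acc lines false = acc.reverse ++ pvBodyOf d rw lines := by
  induction lines with
  | nil => intro acc; simp [pvLoopA, pvBodyOf, pvSpanTo]
  | cons l ls ih =>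
    intro acc
    by_cases hq : pvIsReq l = true
    · have hh : (PySem.Str.startswith (PySem.Str.strip l) "[" && PySem.Str.endswith (PySem.Str.strip l) "]") = true := by
        simpa [pvIsHeader] using pvIsReq_isHeader l hq
      have hq' : (PySem.Str.strip l == "[request]") = true := hq
      simp only [pvLoopA, hh, if_true, Bool.false_eq_true, if_false, hq']
      rw [pvLoopA_true d rw ls (l :: acc), pvBodyOf_req d rw l ls hq]
      simp
    · simp only [Bool.not_eq_true] at hq
      have hq' : (PySem.Str.strip l == "[request]") = false := hq
      by_cases hh : pvIsHeader l = true
      · have hh' : (PySem.Str.startswith (PySem.Str.strip l) "[" && PySem.Str.endswith (PySem.Str.strip l) "]") = true := by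
          simpa [pvIsHeader] using hh
        simp only [pvLoopA, hh', if_true, Bool.false_eq_true, if_false, hq']
        rw [ih (l :: acc), pvBodyOf_skip d rw l ls hq]
        simp
      · have hh' : (PySem.Str.startswith (PySem.Str.strip l) "[" && PySem.Str.endswith (PySem.Str.strip l) "]") = false := by
          simpa [pvIsHeader] using hh
        simp only [pvLoopA, hh', Bool.false_and, Bool.false_eq_true, if_false]
        rw [ih (l :: acc), pvBodyOf_skip d rw l ls hq]
        simp

-- ===== VERDICT (by name: the statement is the Claim_ definition above) =====
theorem with_batched_request_label_prefix_py_spec : Claim_equal_with_batched_request_label_prefix_py := by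
  intro config_toml batch_id _
  unfold Spec_with_batched_request_label_prefix_py
  unfold with_batched_request_label_prefix_py with_batched_request_label_prefix_py_alt
  simp only [pvLoopA_false, List.reverse_nil, List.nil_append]
  unfold pvBodyOf
  rfl
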